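-- pv_equiv track=rewrite | github.com/Some10n3/work | KMITL/kattis/easy/nodupe.py | check_repeated_words
-- ===== SOURCE A (Python) =====
-- def check_repeated_words(phrase):
--     words = phrase.split()
--     word_set = set()
--
--     for word in words:
--         if word in word_set:
--             return "no"
--         else:
--             word_set.add(word)
--
--     return "yes"
-- ===== SOURCE B (Python) =====
-- def check_repeated_words(phrase):
--     ws = sorted(phrase.split())
--     for a, b in zip(ws, ws[1:]):
--         if a == b:
--             return "no"
--     return "yes"
-- ===== Notes on version B (the rewrite author's own statement) =====
-- stated objective: alternative
-- what changed: B sorts the words and scans adjacent pairs for an equal neighbour instead of A's incremental hash-set membership scan; correct because duplicates are adjacent after sorting.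
import Mathlib
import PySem

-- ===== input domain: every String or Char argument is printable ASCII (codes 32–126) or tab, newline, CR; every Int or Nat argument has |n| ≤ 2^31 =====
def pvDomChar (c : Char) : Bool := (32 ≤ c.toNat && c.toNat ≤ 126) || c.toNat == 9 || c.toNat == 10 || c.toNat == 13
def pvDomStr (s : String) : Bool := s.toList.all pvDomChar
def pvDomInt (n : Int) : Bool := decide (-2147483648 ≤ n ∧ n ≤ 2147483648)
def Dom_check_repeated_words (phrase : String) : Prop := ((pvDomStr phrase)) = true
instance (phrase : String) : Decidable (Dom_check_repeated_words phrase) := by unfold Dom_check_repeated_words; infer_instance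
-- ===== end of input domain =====

-- B sorts the words and scans adjacent pairs for an equal neighbour instead of A's
-- incremental membership-set scan; correct because after sorting duplicates are adjacent.

-- ===== PORT A =====
-- the 'for word in words' loop with the growing word_set and early return "no"
def pvLoopA : List String → PySem.Set String → String
  | [], _ => "yes"
  | w :: ws, s => if PySem.Set.contains s w then "no" else pvLoopA ws (PySem.Set.add s w)

def check_repeated_words (phrase : String) : String :=
  pvLoopA (PySem.Str.split₀ phrase) PySem.Set.empty

-- ===== PORT B =====
-- the 'for a, b in zip(ws, ws[1:])' loop with early return "no"
def pvAdjLoop : List (String × String) → String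
  | [] => "yes"
  | (a, b) :: t => if a == b then "no" else pvAdjLoop t

def check_repeated_words_alt (phrase : String) : String :=
  let ws := PySem.List.sorted (PySem.Str.split₀ phrase) (fun x => x) false
  pvAdjLoop (ws.zip (PySem.List.slice ws (some 1) none))

-- ===== PRECONDITION & SPEC =====
def Spec_check_repeated_words (phrase : String) (out : String) : Prop := out = check_repeated_words_alt phrase
instance (phrase : String) (out : String) : Decidable (Spec_check_repeated_words phrase out) := by unfold Spec_check_repeated_words; infer_instance

-- ===== CLAIM (what is proved, stated in full; the proofs are below) =====
def Claim_equal_check_repeated_words : Prop := ∀ (phrase : String), Dom_check_repeated_words phrase → Spec_check_repeated_words phrase (check_repeated_words phrase)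

-- ===== LEMMAS AND PROOFS =====

-- A's loop answers "yes" exactly when the remaining words are distinct and avoid the set so far
lemma pvLoopA_eq (ws : List String) (s : PySem.Set String) :
    pvLoopA ws s = if ws.Nodup ∧ ∀ w ∈ ws, w ∉ s then "yes" else "no" := by
  induction ws generalizing s with
  | nil => simp [pvLoopA]
  | cons w ws ih =>
    simp only [pvLoopA]
    by_cases hm : w ∈ s
    · rw [if_pos, if_neg]
      · rintro ⟨-, hav⟩; exact hav w (by simp) hm
      · simpa [PySem.Set.contains_iff] using hm
    · rw [if_neg, ih]
      · refine if_congr ?_ rfl rfl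
        have hadd : ∀ x : String, x ∈ PySem.Set.add s w ↔ x ∈ s ∨ x = w := by
          intro x
          rw [PySem.Set.mem_add]
        constructor
        · rintro ⟨hnd, hav⟩
          have hkey : ∀ x ∈ ws, x ∉ s ∧ x ≠ w := fun x hx => by
            have hx' := hav x hx
            rw [hadd] at hx'
            exact ⟨fun h => hx' (Or.inl h), fun h => hx' (Or.inr h)⟩
          refine ⟨List.nodup_cons.mpr ⟨fun h => (hkey w h).2 rfl, hnd⟩, ?_⟩
          intro x hx
          rcases List.mem_cons.mp hx with rfl | hx
          · exact hm
          · exact (hkey x hx).1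
        · rintro ⟨hnd, hav⟩
          rcases List.nodup_cons.mp hnd with ⟨hwws, hnd'⟩
          refine ⟨hnd', fun x hx => ?_⟩
          rw [hadd]
          rintro (h | rfl)
          · exact hav x (List.mem_cons_of_mem _ hx) h
          · exact hwws hx
      · simp [hm]

-- B's loop over zip(ws, ws[1:]) answers "yes" exactly when no adjacent pair is equal
lemma pvAdjLoop_eq (l : List String) :
    pvAdjLoop (l.zip l.tail) =
      if List.IsChain (fun a b => a ≠ b) l then "yes" else "no" := by
  induction l with
  | nil => simp [pvAdjLoop]
  | cons a l ih =>
    cases l with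
    | nil => simp [pvAdjLoop]
    | cons b t =>
      simp only [List.tail_cons, List.zip_cons_cons, pvAdjLoop] at *
      by_cases hab : a = b
      · rw [if_pos (by simp [hab]), if_neg (by simp [List.isChain_cons_cons, hab])]
      · rw [if_neg (by simp [hab]), ih]
        by_cases hch : List.IsChain (fun a b => a ≠ b) (b :: t)
        · rw [if_pos hch, if_pos (List.isChain_cons_cons.mpr ⟨hab, hch⟩)]
        · rw [if_neg hch, if_neg (fun h => hch (List.isChain_cons_cons.mp h).2)]

-- on a ≤-sorted list, "no equal neighbours" is exactly Nodup
lemma chain_ne_iff_nodup (l : List String) (hp : l.Pairwise (· ≤ ·)) :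
    List.IsChain (fun a b => a ≠ b) l ↔ l.Nodup := by
  induction l with
  | nil => simp
  | cons a l ih =>
    have hp' := (List.pairwise_cons.mp hp).2
    have hle := (List.pairwise_cons.mp hp).1
    cases l with
    | nil => simp
    | cons b t =>
      rw [List.isChain_cons_cons, List.nodup_cons, ih hp']
      constructor
      · rintro ⟨hab, hch⟩
        refine ⟨?_, hch⟩
        intro hmem
        have hlt : a < b := lt_of_le_of_ne (hle b (by simp)) hab
        rcases List.mem_cons.mp hmem with rfl | hmt
        · exact hab rfl
        · have hba : b ≤ a := (List.pairwise_cons.mp hp').1 a hmt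
          exact absurd (lt_of_lt_of_le hlt hba) (lt_irrefl a)
      · rintro ⟨hna, hnd⟩
        exact ⟨fun h => hna (h ▸ List.mem_cons_self), hnd⟩

-- ===== VERDICT (by name: the statement is the Claim_ definition above) =====
theorem check_repeated_words_spec : Claim_equal_check_repeated_words := by
  intro phrase _
  unfold Spec_check_repeated_words check_repeated_words check_repeated_words_alt
  set ws := PySem.Str.split₀ phrase with hws
  set l := PySem.List.sorted ws (fun x => x) false with hl
  show pvLoopA ws PySem.Set.empty =
    pvAdjLoop (l.zip (PySem.List.slice l (some 1) none))
  rw [pvLoopA_eq, PySem.List.slice_from_one, pvAdjLoop_eq]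
  have hperm : l.Perm ws := PySem.List.sorted_perm ws (fun x => x) false
  have hpw : l.Pairwise (· ≤ ·) := by
    simpa using PySem.List.sorted_pairwise (κ := String) ws (fun x => x)
  by_cases h : ws.Nodup
  · rw [if_pos (by simp [PySem.Set.empty, h]),
      if_pos ((chain_ne_iff_nodup l hpw).mpr (hperm.nodup_iff.mpr h))]
  · rw [if_neg (by simp [PySem.Set.empty, h]),
      if_neg (fun hc => h (hperm.nodup_iff.mp ((chain_ne_iff_nodup l hpw).mp hc)))]
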